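-- pv_equiv track=rewrite | github.com/ask-andrew/360brief | services/data_processing/async_processor.py | _categorize_meetings
-- ===== SOURCE A (Python) =====
-- from typing import List, Dict, Any, Optional
--
-- def _categorize_meetings(events: List[Dict]) -> Dict[str, int]:
--     """Categorize meeting types"""
--     categories = {'standup': 0, 'planning': 0, 'review': 0, 'other': 0}
--
--     for event in events:
--         title = event.get('summary', '').lower()
--         if any(word in title for word in ['standup', 'daily', 'scrum']):
--             categories['standup'] += 1
--         elif any(word in title for word in ['planning', 'roadmap', 'strategy']):
--             categories['planning'] += 1
--         elif any(word in title for word in ['review', 'retrospective', 'demo']):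
--             categories['review'] += 1
--         else:
--             categories['other'] += 1
--
--     return categories
-- ===== SOURCE B (Python) =====
-- CATEGORY_KEYWORDS = [
--     ('standup', ('standup', 'daily', 'scrum')),
--     ('planning', ('planning', 'roadmap', 'strategy')),
--     ('review', ('review', 'retrospective', 'demo')),
-- ]
--
--
-- def _categorize_meetings(events):
--     # Sieve: successive filtering passes, one per category in priority order.
--     # Each pass drops the titles that match the category; the count is the
--     # number of titles removed by that pass; whatever survives all passes is 'other'.
--     remaining = [event.get('summary', '').lower() for event in events]
--     counts = {}
--     for name, words in CATEGORY_KEYWORDS: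
--         survivors = [t for t in remaining
--                      if not any(word in t for word in words)]
--         counts[name] = len(remaining) - len(survivors)
--         remaining = survivors
--     counts['other'] = len(remaining)
--     return counts
-- ===== Notes on version B (the rewrite author's own statement) =====
-- stated objective: alternative
-- what changed: Replaces the per-event elif chain updating a counter dict by a sieve: one filtering pass over the (shrinking) title list per category in priority order, each category's count being the number of titles that pass removes, with the final survivors counted as 'other'.
import Mathlib
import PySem

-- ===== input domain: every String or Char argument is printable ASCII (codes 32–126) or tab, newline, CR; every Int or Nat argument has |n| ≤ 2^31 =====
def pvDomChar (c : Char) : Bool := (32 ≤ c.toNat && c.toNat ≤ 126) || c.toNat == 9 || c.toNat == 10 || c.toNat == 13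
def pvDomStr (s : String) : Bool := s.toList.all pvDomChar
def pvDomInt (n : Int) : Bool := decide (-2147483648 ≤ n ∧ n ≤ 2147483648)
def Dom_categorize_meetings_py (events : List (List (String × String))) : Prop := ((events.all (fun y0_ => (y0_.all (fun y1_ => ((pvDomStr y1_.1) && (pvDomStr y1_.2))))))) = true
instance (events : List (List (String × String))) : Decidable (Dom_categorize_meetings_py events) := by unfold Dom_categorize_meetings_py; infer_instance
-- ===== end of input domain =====

-- B replaces A's per-event elif-chain counter by a sieve of per-category filtering passes (alternative; return value only).

-- ===== PORT A =====
def categorize_meetings_py (events : List (List (String × String))) : List (String × Int) :=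
  let categories : PySem.Dict String Int :=
    ((((PySem.Dict.empty.insert "standup" 0).insert "planning" 0).insert "review" 0).insert "other" 0)
  let categories := events.foldl (fun categories event =>
    let title := PySem.Str.lower ((PySem.Dict.mk event).getD "summary" "")
    if (["standup", "daily", "scrum"].any (fun word => PySem.Str.isIn word title)) then
      categories.modify "standup" 0 (· + 1)
    else if (["planning", "roadmap", "strategy"].any (fun word => PySem.Str.isIn word title)) then
      categories.modify "planning" 0 (· + 1)
    else if (["review", "retrospective", "demo"].any (fun word => PySem.Str.isIn word title)) then
      categories.modify "review" 0 (· + 1)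
    else
      categories.modify "other" 0 (· + 1)) categories
  categories.items

-- ===== PORT B =====
def pvCategoryKeywords : List (String × List String) :=
  [("standup", ["standup", "daily", "scrum"]),
   ("planning", ["planning", "roadmap", "strategy"]),
   ("review", ["review", "retrospective", "demo"])]

def categorize_meetings_py_alt (events : List (List (String × String))) : List (String × Int) :=
  let remaining := events.map (fun event =>
    PySem.Str.lower ((PySem.Dict.mk event).getD "summary" ""))
  let acc := pvCategoryKeywords.foldl
    (fun (acc : PySem.Dict String Int × List String) cat =>
      let survivors := acc.2.filter (fun t => !(cat.2.any (fun word => PySem.Str.isIn word t)))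
      (acc.1.insert cat.1 ((acc.2.length : Int) - (survivors.length : Int)), survivors))
    (PySem.Dict.empty, remaining)
  (acc.1.insert "other" (acc.2.length : Int)).items

-- ===== PRECONDITION & SPEC =====
def Spec_categorize_meetings_py (events : List (List (String × String))) (out : List (String × Int)) : Prop := out = categorize_meetings_py_alt events
instance (events : List (List (String × String))) (out : List (String × Int)) : Decidable (Spec_categorize_meetings_py events out) := by unfold Spec_categorize_meetings_py; infer_instance

-- ===== CLAIM (what is proved, stated in full; the proofs are below) =====
def Claim_equal_categorize_meetings_py : Prop := ∀ (events : List (List (String × String))), Dom_categorize_meetings_py events → Spec_categorize_meetings_py events (categorize_meetings_py events)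

-- ===== LEMMAS AND PROOFS =====

-- match predicates for the three keyword groups, on a (lowered) title
def pvM1 (t : String) : Bool := ["standup", "daily", "scrum"].any (fun word => PySem.Str.isIn word t)
def pvM2 (t : String) : Bool := ["planning", "roadmap", "strategy"].any (fun word => PySem.Str.isIn word t)
def pvM3 (t : String) : Bool := ["review", "retrospective", "demo"].any (fun word => PySem.Str.isIn word t)

-- the category A's elif chain assigns to a title
def pvLabelT (t : String) : String :=
  if pvM1 t then "standup" else if pvM2 t then "planning" else if pvM3 t then "review" else "other"

-- the label of one event
def pvLabel (event : List (String × String)) : String :=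
  pvLabelT (PySem.Str.lower ((PySem.Dict.mk event).getD "summary" ""))

-- a four-counter dict literal
def pvMkD (a b c d : Int) : PySem.Dict String Int :=
  PySem.Dict.mk [("standup", a), ("planning", b), ("review", c), ("other", d)]

lemma pvStep_eq (cats : PySem.Dict String Int) (a b c d : Int) (event : List (String × String))
    (h : cats = pvMkD a b c d) :
    (let title := PySem.Str.lower ((PySem.Dict.mk event).getD "summary" "")
     if (["standup", "daily", "scrum"].any (fun word => PySem.Str.isIn word title)) then
       cats.modify "standup" 0 (· + 1)
     else if (["planning", "roadmap", "strategy"].any (fun word => PySem.Str.isIn word title)) then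
       cats.modify "planning" 0 (· + 1)
     else if (["review", "retrospective", "demo"].any (fun word => PySem.Str.isIn word title)) then
       cats.modify "review" 0 (· + 1)
     else
       cats.modify "other" 0 (· + 1))
    = (if pvLabel event = "standup" then pvMkD (a + 1) b c d
       else if pvLabel event = "planning" then pvMkD a (b + 1) c d
       else if pvLabel event = "review" then pvMkD a b (c + 1) d
       else pvMkD a b c (d + 1)) := by
  subst h
  simp only [pvLabel, pvLabelT, pvM1, pvM2, pvM3]
  split_ifs with h1 h2 h3 <;>
    simp_all [pvMkD, PySem.Dict.modify, PySem.Dict.get?, PySem.Dict.getD, PySem.Dict.insert,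
      PySem.Dict.contains]

lemma pvFold_inv (events : List (List (String × String))) (a b c d : Int) :
    (events.foldl (fun categories event =>
      let title := PySem.Str.lower ((PySem.Dict.mk event).getD "summary" "")
      if (["standup", "daily", "scrum"].any (fun word => PySem.Str.isIn word title)) then
        categories.modify "standup" 0 (· + 1)
      else if (["planning", "roadmap", "strategy"].any (fun word => PySem.Str.isIn word title)) then
        categories.modify "planning" 0 (· + 1)
      else if (["review", "retrospective", "demo"].any (fun word => PySem.Str.isIn word title)) then
        categories.modify "review" 0 (· + 1)
      else
        categories.modify "other" 0 (· + 1)) (pvMkD a b c d)).items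
    = [("standup", a + ((events.map pvLabel).count "standup" : Int)),
       ("planning", b + ((events.map pvLabel).count "planning" : Int)),
       ("review", c + ((events.map pvLabel).count "review" : Int)),
       ("other", d + ((events.map pvLabel).count "other" : Int))] := by
  induction events generalizing a b c d with
  | nil => simp [pvMkD]
  | cons e es ih =>
    rw [List.foldl_cons, pvStep_eq _ a b c d e rfl]
    by_cases h1 : pvLabel e = "standup"
    · rw [if_pos h1, ih]
      simp only [List.map_cons, List.count_cons, h1]
      norm_num
      omega
    · rw [if_neg h1]
      by_cases h2 : pvLabel e = "planning"
      · rw [if_pos h2, ih]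
        simp only [List.map_cons, List.count_cons, h2]
        norm_num [h1]
        omega
      · rw [if_neg h2]
        by_cases h3 : pvLabel e = "review"
        · rw [if_pos h3, ih]
          simp only [List.map_cons, List.count_cons, h3]
          norm_num [h1, h2]
          omega
        · have h4 : pvLabel e = "other" := by
            simp only [pvLabel, pvLabelT] at *
            split_ifs at * <;> simp_all
          rw [if_neg h3, ih]
          simp only [List.map_cons, List.count_cons, h4]
          norm_num [h1, h2, h3]
          omega

-- the sieve's four numbers are the four label counts (filters stated flattened)
lemma pvSieve (ts : List String) :
    ((ts.length : Int) - ((ts.filter (fun t => !pvM1 t)).length : Int)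
        = ((ts.map pvLabelT).count "standup" : Int))
    ∧ ((((ts.filter (fun t => !pvM1 t)).length : Int)
        - ((ts.filter (fun t => !pvM2 t && !pvM1 t)).length : Int))
        = ((ts.map pvLabelT).count "planning" : Int))
    ∧ ((((ts.filter (fun t => !pvM2 t && !pvM1 t)).length : Int)
        - ((ts.filter (fun t => !pvM3 t && (!pvM2 t && !pvM1 t))).length : Int))
        = ((ts.map pvLabelT).count "review" : Int))
    ∧ (((ts.filter (fun t => !pvM3 t && (!pvM2 t && !pvM1 t))).length : Int)
        = ((ts.map pvLabelT).count "other" : Int)) := by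
  induction ts with
  | nil => simp
  | cons t ts ih =>
    obtain ⟨i1, i2, i3, i4⟩ := ih
    by_cases h1 : pvM1 t
    · have hl : pvLabelT t = "standup" := by simp [pvLabelT, h1]
      refine ⟨?_, ?_, ?_, ?_⟩ <;>
        · simp only [List.filter_cons, h1, Bool.not_true, Bool.and_false, Bool.false_and,
            Bool.and_true, Bool.true_and, List.length_cons, List.map_cons, List.count_cons, hl,
            if_false, Bool.false_eq_true, ite_false]
          norm_num
          omega
    · by_cases h2 : pvM2 t
      · have hl : pvLabelT t = "planning" := by simp [pvLabelT, h1, h2]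
        refine ⟨?_, ?_, ?_, ?_⟩ <;>
          · simp only [List.filter_cons, h1, h2, Bool.not_true, Bool.not_false, Bool.and_false,
              Bool.false_and, Bool.and_true, Bool.true_and, List.length_cons, List.map_cons,
              List.count_cons, hl, Bool.false_eq_true, ite_false, ite_true]
            norm_num
            omega
      · by_cases h3 : pvM3 t
        · have hl : pvLabelT t = "review" := by simp [pvLabelT, h1, h2, h3]
          refine ⟨?_, ?_, ?_, ?_⟩ <;>
            · simp only [List.filter_cons, h1, h2, h3, Bool.not_true, Bool.not_false,
                Bool.and_false, Bool.false_and, Bool.and_true, Bool.true_and, List.length_cons,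
                List.map_cons, List.count_cons, hl, Bool.false_eq_true, ite_false, ite_true]
              norm_num
              omega
        · have hl : pvLabelT t = "other" := by simp [pvLabelT, h1, h2, h3]
          refine ⟨?_, ?_, ?_, ?_⟩ <;>
            · simp only [List.filter_cons, h1, h2, h3, Bool.not_true, Bool.not_false,
                Bool.and_false, Bool.false_and, Bool.and_true, Bool.true_and, List.length_cons,
                List.map_cons, List.count_cons, hl, Bool.false_eq_true, ite_false, ite_true]
              norm_num
              omega

-- ===== VERDICT (by name: the statement is the Claim_ definition above) =====
theorem categorize_meetings_py_spec : Claim_equal_categorize_meetings_py := by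
  intro events _
  show categorize_meetings_py events = categorize_meetings_py_alt events
  unfold categorize_meetings_py categorize_meetings_py_alt
  have hinit : ((((PySem.Dict.empty.insert "standup" (0 : Int)).insert "planning" 0).insert "review" 0).insert "other" 0) = pvMkD 0 0 0 0 := by decide
  rw [hinit, pvFold_inv]
  set ts := events.map (fun event =>
    PySem.Str.lower ((PySem.Dict.mk event).getD "summary" "")) with hts
  have hmap : events.map pvLabel = ts.map pvLabelT := by
    simp [hts, pvLabel, List.map_map, Function.comp]
  obtain ⟨s1, s2, s3, s4⟩ := pvSieve ts
  simp only [pvCategoryKeywords, List.foldl_cons, List.foldl_nil, List.filter_filter]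
  simp only [pvM1, pvM2, pvM3] at s1 s2 s3 s4
  simp only [hmap, ← s1, ← s2, ← s3, ← s4, zero_add]
  simp [PySem.Dict.insert, PySem.Dict.items, PySem.Dict.empty, PySem.Dict.contains, pvMkD]
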